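-- pv_equiv track=rewrite | github.com/RakshitTikoo/15-466-f22-base1 | convert_png_2_code.py | max_repeat_val
-- ===== SOURCE A (Python) =====
-- def cmp_lists(a, b):
--     if len(a) != len(b):
--         return False
--     for i in range(len(a)):
--         if a[i] != b[i]:
--             return False
--     return True
--
-- def present_in_list(small, bigger):
--     for i in range(len(bigger)):
--         if len(small) == len(bigger[i]):
--             fl = 1
--             for j in range(len(small)):
--                 if small[j] != bigger[i][j]:
--                     fl = 0
--             if(fl == 1):
--                 return True
--
--     return False
--
-- def max_repeat_val (arr):
--     max_ele = arr[0]
--     max_cnt = 0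
--     checked_ele = []
--
--     for i in range(len(arr)):
--         if present_in_list(arr[i],checked_ele) == False:
--             checked_ele += [arr[i]]
--             cnt = 0
--             for j in range(len(arr)):
--                 if cmp_lists(arr[i],arr[j]) == True:
--                     cnt += 1
--             if cnt > max_cnt:
--                 max_cnt = cnt
--                 max_ele = arr[i]
--     return list(max_ele)
-- ===== SOURCE B (Python) =====
-- def max_repeat_val(arr):
--     counts = {}
--     for x in arr:
--         k = tuple(x)
--         counts[k] = counts.get(k, 0) + 1
--     best = max(counts.items(), key=lambda kv: kv[1])
--     return list(best[0])
-- ===== Notes on version B (the rewrite author's own statement) =====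
-- stated objective: faster
-- what changed: Replaces A's quadratic distinct-scan (for each unseen sublist, rescan the whole list to count it, with a hand-rolled linear membership test) by a single pass that builds a hash counter keyed by the tuple of each sublist and then takes the first maximum of the counter's items, which reproduces A's first-occurrence tie-break via dict insertion order.
import Mathlib
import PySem

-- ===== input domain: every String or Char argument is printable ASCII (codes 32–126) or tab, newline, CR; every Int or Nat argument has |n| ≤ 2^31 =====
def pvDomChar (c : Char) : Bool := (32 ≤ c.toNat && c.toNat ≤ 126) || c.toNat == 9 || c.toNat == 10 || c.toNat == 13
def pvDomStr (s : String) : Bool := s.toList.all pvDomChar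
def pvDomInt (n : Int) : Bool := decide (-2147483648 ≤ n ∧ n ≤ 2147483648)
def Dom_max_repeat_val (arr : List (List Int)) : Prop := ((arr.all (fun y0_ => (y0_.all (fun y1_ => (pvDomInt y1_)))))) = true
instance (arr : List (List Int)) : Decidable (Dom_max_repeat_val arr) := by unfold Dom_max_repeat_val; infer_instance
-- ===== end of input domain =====

-- B replaces A's quadratic rescan-and-count over distinct sublists by one hash-counter pass plus a
-- first-maximum scan of the counter items (same value, same first-occurrence tie-break).

-- ===== PORT A =====
def cmp_lists (a b : List Int) : Bool :=
  if a.length ≠ b.length then false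
  else (a.zip b).all (fun p => p.1 == p.2)

def present_in_list (small : List Int) (bigger : List (List Int)) : Bool :=
  bigger.any (fun big => small.length == big.length && (small.zip big).all (fun p => p.1 == p.2))

-- the body of A's outer loop; state = (max_ele, max_cnt, checked_ele)
def stepA (arr : List (List Int)) (s : List Int × Int × List (List Int)) (x : List Int) :
    List Int × Int × List (List Int) :=
  if present_in_list x s.2.2 = false then
    let checked_ele := s.2.2 ++ [x]
    let cnt := arr.foldl (fun c y => if cmp_lists x y = true then c + 1 else c) (0 : Int)
    if cnt > s.2.1 then (x, cnt, checked_ele) else (s.1, s.2.1, checked_ele)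
  else s

def max_repeat_val (arr : List (List Int)) : List Int :=
  (arr.foldl (stepA arr) (arr.headD [], 0, [])).1

-- ===== PORT B =====
-- counts[tuple(x)] = counts.get(tuple(x), 0) + 1
def bumpCount (d : PySem.Dict (List Int) Int) (x : List Int) : PySem.Dict (List Int) Int :=
  d.insert x (d.getD x 0 + 1)

def max_repeat_val_alt (arr : List (List Int)) : List Int :=
  let counts := arr.foldl bumpCount PySem.Dict.empty
  match PySem.List.max? counts.items (fun kv => kv.2) with
  | none => []       -- unreachable under Pre_ (Python's max raises ValueError on an empty dict)
  | some best => best.1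

-- ===== PRECONDITION & SPEC =====
-- A raises IndexError on arr[0] (and B's max raises ValueError) for the empty list; nothing else is excluded.
def Pre_max_repeat_val (arr : List (List Int)) : Prop := arr ≠ []
instance (arr : List (List Int)) : Decidable (Pre_max_repeat_val arr) := by
  unfold Pre_max_repeat_val; infer_instance

def pvWitness_max_repeat_val : List (List Int) := [[1], [2], [1]]

def Spec_max_repeat_val (arr : List (List Int)) (out : List Int) : Prop := out = max_repeat_val_alt arr
instance (arr : List (List Int)) (out : List Int) : Decidable (Spec_max_repeat_val arr out) := by
  unfold Spec_max_repeat_val; infer_instance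

-- ===== CLAIM (what is proved, stated in full; the proofs are below) =====
def Claim_equal_max_repeat_val : Prop := ∀ (arr : List (List Int)), Dom_max_repeat_val arr → Pre_max_repeat_val arr → Spec_max_repeat_val arr (max_repeat_val arr)

-- ===== LEMMAS AND PROOFS =====

-- the selection step shared by both programs: keep the first pair with the strictly largest count
def selStep (m x : List Int × Int) : List Int × Int := if m.2 < x.2 then x else m

-- the elements of l not in ch, first occurrences, in order
def newOf (ch : List (List Int)) : List (List Int) → List (List Int)
  | [] => []
  | x :: xs => if x ∈ ch then newOf ch xs else x :: newOf (ch ++ [x]) xs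

lemma cmp_true (a b : List Int) : cmp_lists a b = true ↔ a = b := by
  induction a generalizing b with
  | nil => cases b <;> simp [cmp_lists]
  | cons x xs ih =>
    cases b with
    | nil => simp [cmp_lists]
    | cons y ys =>
      by_cases h : xs.length = ys.length
      · have := ih ys
        simp [cmp_lists, h] at this ⊢
        tauto
      · simp [cmp_lists, h]
        intro hx he
        exact absurd (congrArg List.length he) (by simpa using h)

lemma present_true (s : List Int) (ch : List (List Int)) :
    present_in_list s ch = true ↔ s ∈ ch := by
  have inner : ∀ b : List Int,
      (s.length == b.length && (s.zip b).all (fun p => p.1 == p.2)) = cmp_lists s b := by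
    intro b
    by_cases h : s.length = b.length <;> simp [cmp_lists, h]
  constructor
  · intro h
    simp only [present_in_list, List.any_eq_true] at h
    obtain ⟨b, hb, hh⟩ := h
    rw [inner b] at hh
    exact (cmp_true s b).mp hh ▸ hb
  · intro h
    simp only [present_in_list, List.any_eq_true]
    exact ⟨s, h, by rw [inner s]; exact (cmp_true s s).mpr rfl⟩

lemma cnt_fold (x : List Int) :
    ∀ (l : List (List Int)) (c : Int),
      l.foldl (fun c y => if cmp_lists x y = true then c + 1 else c) c = c + (l.count x : Int) := by
  have hf : (fun (c : Int) (y : List Int) => if cmp_lists x y = true then c + 1 else c)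
      = fun (c : Int) (y : List Int) => if x = y then c + 1 else c := by
    funext c y
    by_cases h : x = y <;> simp [cmp_true, h]
  rw [hf]
  intro l
  induction l with
  | nil => intro c; simp
  | cons y ys ih =>
    intro c
    simp only [List.foldl_cons]
    by_cases h : x = y
    · rw [if_pos h, ih, h, List.count_cons_self]
      push_cast
      ring
    · have h' : ¬ y = x := fun hh => h hh.symm
      rw [if_neg h, ih]
      simp [h']

-- A's whole outer loop is the selection fold over the unseen first occurrences, with counts attached
lemma loopA (arr : List (List Int)) :
    ∀ (l ch : List (List Int)) (e : List Int) (c : Int),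
      l.foldl (stepA arr) (e, c, ch)
        = ((((newOf ch l).map (fun k => (k, (arr.count k : Int)))).foldl selStep (e, c)).1,
           (((newOf ch l).map (fun k => (k, (arr.count k : Int)))).foldl selStep (e, c)).2,
           ch ++ newOf ch l) := by
  intro l
  induction l with
  | nil => intro ch e c; simp [newOf]
  | cons x xs ih =>
    intro ch e c
    by_cases hm : x ∈ ch
    · have hp : present_in_list x ch = true := (present_true x ch).mpr hm
      simp [List.foldl_cons, stepA, hp, newOf, hm, ih]
    · have hp : present_in_list x ch = false := by
        cases hpe : present_in_list x ch
        · rfl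
        · exact absurd ((present_true x ch).mp hpe) hm
      have hnew : newOf ch (x :: xs) = x :: newOf (ch ++ [x]) xs := by
        simp [newOf, hm]
      have hstep : stepA arr (e, c, ch) x
          = (if c < (arr.count x : Int) then ((x : List Int), (arr.count x : Int), ch ++ [x])
             else (e, c, ch ++ [x])) := by
        simp only [stepA, hp, cnt_fold x arr 0, gt_iff_lt]
        split <;> simp_all
      have hsel : selStep (e, c) (x, (arr.count x : Int))
          = (if c < (arr.count x : Int) then ((x : List Int), (arr.count x : Int)) else (e, c)) := by
        simp [selStep]
      simp only [List.foldl_cons, hstep, hnew, List.map_cons, hsel]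
      by_cases hc : c < (arr.count x : Int)
      · rw [if_pos hc, if_pos hc, ih (ch ++ [x]) x ((arr.count x : Int))]
        simp [List.append_assoc]
      · rw [if_neg hc, if_neg hc, ih (ch ++ [x]) e c]
        simp [List.append_assoc]

lemma update_newOf : ∀ (l ch : List (List Int)),
    PySem.Set.update ch l = ch ++ newOf ch l := by
  intro l
  induction l with
  | nil => intro ch; simp [PySem.Set.update_nil, newOf]
  | cons x xs ih =>
    intro ch
    by_cases hm : x ∈ ch
    · rw [PySem.Set.update_cons, PySem.Set.add_of_mem hm, ih]
      simp [newOf, hm]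
    · rw [PySem.Set.update_cons, PySem.Set.add_of_not_mem hm, ih]
      simp [newOf, hm]

lemma ofList_newOf (l : List (List Int)) : PySem.Set.ofList l = newOf ([] : List (List Int)) l := by
  have h := update_newOf l []
  rwa [PySem.Set.update_nil_left, List.nil_append] at h

-- B's running-max scan over a nonempty list is the selection fold from its head
lemma max?_cons :
    ∀ (ps : List ((List Int) × Int)) (p : (List Int) × Int),
      PySem.List.max? (p :: ps) (fun kv => kv.2) = some (ps.foldl selStep p) := by
  intro ps
  induction ps with
  | nil => intro p; rfl
  | cons q qs ih =>
    intro p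
    have h1 : PySem.List.max? (p :: q :: qs) (fun kv => kv.2)
        = PySem.List.max? (selStep p q :: qs) (fun kv => kv.2) := by
      simp only [PySem.List.max?, List.foldl_cons, selStep]
      by_cases h : p.2 < q.2 <;> simp [h]
    rw [h1, ih (selStep p q)]
    simp [List.foldl_cons]

-- ===== VERDICT (by name: the statement is the Claim_ definition above) =====
theorem max_repeat_val_spec : Claim_equal_max_repeat_val := by
  intro arr _ hpre
  unfold Spec_max_repeat_val
  cases arr with
  | nil => exact absurd rfl hpre
  | cons a rest =>
    -- A's side
    have hA : max_repeat_val (a :: rest)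
        = (((newOf [a] rest).map (fun k => (k, ((a :: rest).count k : Int)))).foldl selStep
            (a, ((a :: rest).count a : Int))).1 := by
      rw [max_repeat_val, loopA (a :: rest) (a :: rest) [] (List.headD (a :: rest) []) 0]
      have h1 : newOf ([] : List (List Int)) (a :: rest) = a :: newOf [a] rest := by
        simp [newOf]
      rw [h1]
      simp only [List.map_cons, List.foldl_cons, List.headD_cons]
      have : selStep (a, (0 : Int)) (a, ((a :: rest).count a : Int))
          = (a, ((a :: rest).count a : Int)) := by
        simp [selStep]
      rw [this]
    -- B's side
    have hB : max_repeat_val_alt (a :: rest)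
        = (((newOf [a] rest).map (fun k => (k, ((a :: rest).count k : Int)))).foldl selStep
            (a, ((a :: rest).count a : Int))).1 := by
      show (match PySem.List.max?
              ((a :: rest).foldl bumpCount PySem.Dict.empty).items (fun kv => kv.2) with
            | none => ([] : List Int)
            | some best => best.1)
          = _
      have hctr : (a :: rest).foldl bumpCount PySem.Dict.empty
          = PySem.Dict.counter (a :: rest) :=
        PySem.Dict.foldl_insert_getD_add_one_eq_counter (a :: rest)
      have h1 : newOf ([] : List (List Int)) (a :: rest) = a :: newOf [a] rest := by
        simp [newOf]
      rw [hctr, PySem.Dict.items_counter, ofList_newOf, h1, List.map_cons,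
        max?_cons ((newOf [a] rest).map (fun k => (k, ((a :: rest).count k : Int))))
          (a, ((a :: rest).count a : Int))]
    rw [hA, hB]
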